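-- pv_equiv track=rewrite | github.com/ehddn5252/Algorithm | for_coding_test/20230316_gabia/test.py | solution
-- ===== SOURCE A (Python) =====
-- from itertools import combinations
-- from itertools import combinations
--
-- def solution(dots, lines):
--     # 가능한 선분 조합 구하기
--     line_combinations = []
--     for i in range(1, len(lines) + 1):
--         line_combinations.extend(combinations(lines, i))
--
--     # 가능한 선분 조합으로 점들을 덮을 수 있는지 확인하고 최소 개수 구하기
--     min_count = len(dots)
--     for line_set in line_combinations:
--         used_lines = set()
--         count = 0
--         for i in range(len(dots) - 1):
--             distance = dots[i + 1] - dots[i]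
--             for line in sorted(line_set, reverse=True):
--                 if distance <= line and line not in used_lines:
--                     count += 1
--                     break
--         # 모든 점을 덮을 수 있는 경우
--         if count < min_count:
--             min_count = count
--
--     # 모든 조합으로도 덮을 수 없는 경우
--     if min_count == len(dots):
--         return -1
--     else:
--         return min_count
-- ===== SOURCE B (Python) =====
-- def solution(dots, lines):
--     # The subset search in A is redundant: with an empty used_lines set, a
--     # subset covers exactly the gaps <= its maximum line, so the minimum over
--     # all non-empty subsets is the gap count for the single shortest line.
--     if not lines or not dots:
--         return -1
--     m = min(lines)
--     cnt = 0
--     for i in range(len(dots) - 1):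
--         if dots[i + 1] - dots[i] <= m:
--             cnt += 1
--     return cnt
-- ===== Notes on version B (the rewrite author's own statement) =====
-- stated objective: faster
-- what changed: A enumerates all 2^m-1 non-empty subsets of lines and counts coverable gaps for each; B observes that (since A's used_lines set is never filled) a subset's count depends only on its maximum, so the minimum is attained by the singleton {min(lines)}, and counts adjacent gaps <= min(lines) in one pass.
import Mathlib
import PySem

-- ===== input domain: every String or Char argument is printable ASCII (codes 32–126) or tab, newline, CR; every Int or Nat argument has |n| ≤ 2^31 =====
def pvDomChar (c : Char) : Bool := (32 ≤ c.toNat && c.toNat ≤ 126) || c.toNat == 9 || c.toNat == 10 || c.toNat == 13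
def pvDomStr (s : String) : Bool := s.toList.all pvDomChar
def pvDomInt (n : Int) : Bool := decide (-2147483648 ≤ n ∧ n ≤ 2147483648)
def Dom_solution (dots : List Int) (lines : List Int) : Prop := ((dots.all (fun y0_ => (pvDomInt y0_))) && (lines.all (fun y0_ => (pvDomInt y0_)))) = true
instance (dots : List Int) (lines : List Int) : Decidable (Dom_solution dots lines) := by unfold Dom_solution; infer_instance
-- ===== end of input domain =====

-- B replaces A's exponential subset enumeration by a single pass counting adjacent gaps ≤ min(lines) (asymptotically faster).


-- ===== PORT A =====
-- inner 'for line in sorted(line_set, reverse=True): if distance <= line and line not in used_lines: count += 1; break'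
-- (returns whether the break was hit; the caller adds 1)
def coverLoop (distance : Int) : List Int → PySem.Set Int → Bool
  | [], _ => false
  | l :: rest, used =>
    if distance ≤ l ∧ ¬ PySem.Set.contains used l then true
    else coverLoop distance rest used

def solution (dots : List Int) (lines : List Int) : Int :=
  let lineCombos : List (List Int) :=
    (PySem.List.pyRange 1 ((lines.length : Int) + 1) 1).foldl
      (fun acc i => acc ++ PySem.List.combinations lines i.toNat) []
  let minCount : Int :=
    lineCombos.foldl
      (fun mc lineSet =>
        let count : Int :=
          (PySem.List.pyRange 0 ((dots.length : Int) - 1) 1).foldl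
            (fun c i =>
              let distance := PySem.List.pyGetD dots (i + 1) 0 - PySem.List.pyGetD dots i 0
              if coverLoop distance (PySem.List.sorted lineSet (fun x => x) true) PySem.Set.empty
              then c + 1 else c)
            0
        if count < mc then count else mc)
      (dots.length : Int)
  if minCount = (dots.length : Int) then -1 else minCount

-- ===== PORT B =====
def solution_alt (dots : List Int) (lines : List Int) : Int :=
  if lines.isEmpty || dots.isEmpty then -1
  else
    let m := (PySem.List.min? lines (fun x => x)).getD 0
    (PySem.List.pyRange 0 ((dots.length : Int) - 1) 1).foldl
      (fun c i =>
        if PySem.List.pyGetD dots (i + 1) 0 - PySem.List.pyGetD dots i 0 ≤ m then c + 1 else c)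
      0

-- ===== PRECONDITION & SPEC =====
def Spec_solution (dots : List Int) (lines : List Int) (out : Int) : Prop := out = solution_alt dots lines
instance (dots : List Int) (lines : List Int) (out : Int) : Decidable (Spec_solution dots lines out) := by unfold Spec_solution; infer_instance

-- ===== CLAIM (what is proved, stated in full; the proofs are below) =====
def Claim_equal_solution : Prop := ∀ (dots : List Int) (lines : List Int), Dom_solution dots lines → Spec_solution dots lines (solution dots lines)

-- ===== LEMMAS AND PROOFS =====

-- the gap predicate of A's inner loop, on the empty used_lines set, is just 'some line covers the gap'
theorem coverLoop_empty (d : Int) (L : List Int) :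
    coverLoop d L PySem.Set.empty = L.any (fun l => decide (d ≤ l)) := by
  induction L with
  | nil => rfl
  | cons x t ih =>
    simp only [PySem.Set.empty] at ih ⊢
    simp [coverLoop, PySem.Set.contains, ih]

-- fold-min helpers (A's running minimum over the subset list)
theorem foldMin_le_init {α : Type} (f : α → Int) (L : List α) (init : Int) :
    L.foldl (fun mc S => if f S < mc then f S else mc) init ≤ init := by
  induction L generalizing init with
  | nil => simp
  | cons x t ih =>
    simp only [List.foldl_cons]
    split_ifs with h
    · exact le_trans (ih _) (le_of_lt h)
    · exact ih _

theorem foldMin_le_mem {α : Type} (f : α → Int) (L : List α) (init : Int) (x : α)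
    (hx : x ∈ L) :
    L.foldl (fun mc S => if f S < mc then f S else mc) init ≤ f x := by
  induction L generalizing init with
  | nil => cases hx
  | cons y t ih =>
    simp only [List.foldl_cons]
    rcases List.mem_cons.mp hx with h | h
    · subst h
      split_ifs with hlt
      · exact foldMin_le_init f t _
      · exact le_trans (foldMin_le_init f t _) (not_lt.mp hlt)
    · exact ih _ h

theorem foldMin_ge {α : Type} (f : α → Int) (v : Int) (L : List α) (init : Int)
    (h0 : v ≤ init) (h : ∀ x ∈ L, v ≤ f x) :
    v ≤ L.foldl (fun mc S => if f S < mc then f S else mc) init := by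
  induction L generalizing init with
  | nil => simpa using h0
  | cons x t ih =>
    simp only [List.foldl_cons]
    split_ifs with hlt
    · exact ih _ (h x (List.mem_cons_self)) (fun y hy => h y (List.mem_cons_of_mem _ hy))
    · exact ih _ h0 (fun y hy => h y (List.mem_cons_of_mem _ hy))


-- A's inner gap-count for one subset S, as a countP over the gap indices
theorem cntA_eq (dots : List Int) (S : List Int) :
    (PySem.List.pyRange 0 ((dots.length : Int) - 1) 1).foldl
      (fun c i =>
        let distance := PySem.List.pyGetD dots (i + 1) 0 - PySem.List.pyGetD dots i 0
        if coverLoop distance (PySem.List.sorted S (fun x => x) true) PySem.Set.empty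
        then c + 1 else c) 0
    = ((PySem.List.pyRange 0 ((dots.length : Int) - 1) 1).countP
        (fun i => S.any (fun l => decide (PySem.List.pyGetD dots (i + 1) 0 - PySem.List.pyGetD dots i 0 ≤ l))) : Int) := by
  rw [PySem.List.foldl_if_add_one
    (p := fun i => coverLoop (PySem.List.pyGetD dots (i + 1) 0 - PySem.List.pyGetD dots i 0)
      (PySem.List.sorted S (fun x => x) true) PySem.Set.empty)]
  rw [List.countP_congr (q := fun i => S.any (fun l => decide (PySem.List.pyGetD dots (i + 1) 0 - PySem.List.pyGetD dots i 0 ≤ l)))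
    (fun i _ => by
      rw [coverLoop_empty, List.Perm.any_eq (PySem.List.sorted_perm S (fun x => x) true)])]
  simp

-- ===== VERDICT (by name: the statement is the Claim_ definition above) =====
theorem solution_spec : Claim_equal_solution := by
  intro dots lines _
  show solution dots lines = solution_alt dots lines
  by_cases hl : lines = []
  · subst hl
    simp [solution, solution_alt]
  · by_cases hd : dots = []
    · subst hd
      have halt : solution_alt [] lines = -1 := by simp [solution_alt]
      rw [halt]
      simp only [solution]
      have h0 : ∀ L : List (List Int),
          L.foldl (fun mc S => if (0:Int) < mc then (0:Int) else mc) 0 = 0 := by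
        intro L
        induction L with
        | nil => rfl
        | cons x t ih => simpa using ih
      simp [h0]
    · -- main case: lines ≠ [], dots ≠ []
      obtain ⟨m, hm⟩ : ∃ m, PySem.List.min? lines (fun x => x) = some m := by
        cases h : PySem.List.min? lines (fun x => x) with
        | none => exact absurd ((PySem.List.min?_eq_none_iff lines _).mp h) hl
        | some m => exact ⟨m, rfl⟩
      have hmmem : m ∈ lines := PySem.List.min?_mem hm
      have hmmin : ∀ y ∈ lines, m ≤ y := PySem.List.min?_isMin hm
      have hdn : 0 < dots.length := List.length_pos_iff.mpr hd
      have hln : 0 < lines.length := List.length_pos_iff.mpr hl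
      set gap : Int → Int :=
        fun i => PySem.List.pyGetD dots (i + 1) 0 - PySem.List.pyGetD dots i 0 with hgap
      set R : List Int := PySem.List.pyRange 0 ((dots.length : Int) - 1) 1 with hR
      set v : Nat := R.countP (fun i => decide (gap i ≤ m)) with hv
      have hvlt : (v : Int) < (dots.length : Int) := by
        have h1 : v ≤ R.length := List.countP_le_length
        have h2 : ((dots.length : Int) - 1) = ((dots.length - 1 : Nat) : Int) := by
          push_cast [hdn]; omega
        rw [hR, h2, PySem.List.pyRange_zero_natCast] at h1
        simp at h1
        omega
      have halt : solution_alt dots lines = (v : Int) := by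
        simp only [solution_alt, hm]
        rw [if_neg (by simp [hl, hd])]
        simp only [Option.getD_some]
        have hfold := PySem.List.foldl_ite_add_one
          (fun i => PySem.List.pyGetD dots (i + 1) 0 - PySem.List.pyGetD dots i 0 ≤ m)
          (PySem.List.pyRange 0 ((dots.length : Int) - 1) 1) 0
        exact hfold.trans (by simp [hv, hR, hgap])
      -- A's count for one subset, as f S
      set f : List Int → Int :=
        fun S => (R.countP (fun i => S.any (fun l => decide (gap i ≤ l))) : Int) with hf
      have hfm : f [m] = (v : Int) := by
        simp only [hf, hv]
        congr 1
        apply List.countP_congr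
        intro i _
        simp
      have hA : solution dots lines = (v : Int) := by
        simp only [solution]
        rw [PySem.List.foldl_append_eq_flatMap]
        simp only [List.nil_append]
        have hfun : (fun (mc : Int) (lineSet : List Int) =>
            let count : Int :=
              (PySem.List.pyRange 0 ((dots.length : Int) - 1) 1).foldl
                (fun c i =>
                  let distance := PySem.List.pyGetD dots (i + 1) 0 - PySem.List.pyGetD dots i 0
                  if coverLoop distance (PySem.List.sorted lineSet (fun x => x) true) PySem.Set.empty
                  then c + 1 else c) 0
            if count < mc then count else mc)
            = (fun mc S => if f S < mc then f S else mc) := by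
          funext mc S
          simp only [cntA_eq dots S, hf, hR, hgap]
        rw [hfun]
        set LC : List (List Int) :=
          (PySem.List.pyRange 1 ((lines.length : Int) + 1) 1).flatMap
            (fun i => PySem.List.combinations lines i.toNat) with hLC
        have hmemLC : [m] ∈ LC := by
          rw [hLC]
          refine List.mem_flatMap.mpr ⟨1, ?_, ?_⟩
          · exact PySem.List.mem_pyRange_one.mpr ⟨le_refl 1, by exact_mod_cast Nat.lt_add_of_pos_left hln⟩
          · rw [show (1 : Int).toNat = 1 from rfl, PySem.List.combinations_one]
            exact List.mem_map_of_mem hmmem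
        have hge : ∀ S ∈ LC, (v : Int) ≤ f S := by
          intro S hS
          obtain ⟨i, hi, hSc⟩ := List.mem_flatMap.mp (hLC ▸ hS)
          obtain ⟨hi1, _⟩ := PySem.List.mem_pyRange_one.mp hi
          obtain ⟨hsub, hlen⟩ := (PySem.List.mem_combinations_iff lines i.toNat S).mp hSc
          have hSne : S ≠ [] := by
            intro h; rw [h] at hlen; simp at hlen; omega
          obtain ⟨l0, hl0⟩ := List.exists_mem_of_ne_nil S hSne
          simp only [hf, hv]
          exact_mod_cast List.countP_mono_left (fun x _ hx => by
            refine List.any_eq_true.mpr ⟨l0, hl0, ?_⟩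
            have : gap x ≤ m := of_decide_eq_true hx
            exact decide_eq_true (le_trans this (hmmin l0 (hsub.subset hl0))))
        have hle : LC.foldl (fun mc S => if f S < mc then f S else mc) (dots.length : Int) ≤ (v : Int) := by
          calc LC.foldl (fun mc S => if f S < mc then f S else mc) (dots.length : Int)
              ≤ f [m] := foldMin_le_mem f LC _ _ hmemLC
            _ = (v : Int) := hfm
        have hgefold : (v : Int) ≤ LC.foldl (fun mc S => if f S < mc then f S else mc) (dots.length : Int) :=
          foldMin_ge f (v : Int) LC _ (le_of_lt hvlt) hge
        have heq : LC.foldl (fun mc S => if f S < mc then f S else mc) (dots.length : Int) = (v : Int) :=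
          le_antisymm hle hgefold
        rw [heq, if_neg (by omega)]
      rw [hA, halt]
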